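-- pv_equiv track=rewrite | github.com/patelherat/Auto-Complete | Lab5.py | search_prefix_next
-- ===== SOURCE A (Python) =====
-- def search_prefix_next(prefix, start, dictionary):
--     """
--     Linear search to find the remaining matches
--     :param prefix: prefix
--     :param start: index from where the linear search begins
--     :param dictionary: sorted list of words
--     :return: returns first match after 'start'
--     """
--     if (start != len(dictionary)) and (start != 0):
--         newDictionary = dictionary[start:]
--         for i in range(len(newDictionary)):
--             if newDictionary[i].startswith(prefix):
--                 return newDictionary[i]
--         return search_prefix_next(prefix, 0, dictionary)
--     else:
--         for i in range(len(dictionary)):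
--             if dictionary[i].startswith(prefix):
--                 return dictionary[i]
-- ===== SOURCE B (Python) =====
-- def search_prefix_next(prefix, start, dictionary):
--     # One pass with enumerate: return the first match at index >= s (slice-normalized
--     # start), remembering the first match overall as the wrap-around fallback.
--     n = len(dictionary)
--     s = start + n if start < 0 else start
--     s = 0 if s < 0 else (n if s > n else s)
--     early = None
--     for i, w in enumerate(dictionary):
--         if w.startswith(prefix):
--             if i >= s:
--                 return w
--             if early is None:
--                 early = w
--     return early
-- ===== Notes on version B (the rewrite author's own statement) =====
-- stated objective: simpler
-- what changed: A slices the list, scans the slice, and recurses to rescan the whole list; B makes a single enumerate pass that returns the first match at index >= the normalized start and remembers the first match overall as the wrap-around fallback (no slice copy, no recursion, no second scan).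
import Mathlib
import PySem

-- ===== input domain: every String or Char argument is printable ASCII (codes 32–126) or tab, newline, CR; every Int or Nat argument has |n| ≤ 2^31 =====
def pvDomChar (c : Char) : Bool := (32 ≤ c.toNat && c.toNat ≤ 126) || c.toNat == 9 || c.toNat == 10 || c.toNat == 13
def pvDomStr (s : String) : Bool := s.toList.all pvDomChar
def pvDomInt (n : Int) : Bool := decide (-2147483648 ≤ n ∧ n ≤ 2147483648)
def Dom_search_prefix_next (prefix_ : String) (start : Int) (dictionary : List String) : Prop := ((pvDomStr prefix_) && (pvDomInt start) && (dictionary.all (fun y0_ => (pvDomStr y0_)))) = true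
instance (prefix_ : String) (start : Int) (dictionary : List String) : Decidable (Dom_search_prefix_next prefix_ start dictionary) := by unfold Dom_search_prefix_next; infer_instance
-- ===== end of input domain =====

-- B replaces A's slice + scan + recursive full rescan by a single enumerate pass with a wrap-around fallback (simpler; return value only, A mutates nothing).


-- ===== PORT A =====
-- A's for-loop: return the first word starting with prefix_, none when the loop falls through.
def pvScanA (prefix_ : String) : List String → Option String
  | [] => none
  | w :: ws => if PySem.Str.startswith w prefix_ then some w else pvScanA prefix_ ws

def search_prefix_next (prefix_ : String) (start : Int) (dictionary : List String) : Option String :=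
  if start ≠ (dictionary.length : Int) ∧ start ≠ 0 then
    let newDictionary := PySem.List.slice dictionary (some start) none
    match pvScanA prefix_ newDictionary with
    | some w => some w
    | none => search_prefix_next prefix_ 0 dictionary
  else
    pvScanA prefix_ dictionary
termination_by (if start = 0 then 0 else 1)
decreasing_by simp_all

-- ===== PORT B =====
-- B's for-loop over enumerate: i = current index, early = first match seen so far (the wrap-around fallback).
def pvLoopB (prefix_ : String) (s : Int) : Int → List String → Option String → Option String
  | _, [], early => early
  | i, w :: ws, early =>
    if PySem.Str.startswith w prefix_ then
      if i ≥ s then some w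
      else pvLoopB prefix_ s (i + 1) ws (if early = none then some w else early)
    else pvLoopB prefix_ s (i + 1) ws early

def search_prefix_next_alt (prefix_ : String) (start : Int) (dictionary : List String) : Option String :=
  let n : Int := dictionary.length
  let s0 : Int := if start < 0 then start + n else start
  let s : Int := if s0 < 0 then 0 else if s0 > n then n else s0
  pvLoopB prefix_ s 0 dictionary none

-- ===== PRECONDITION & SPEC =====
def Spec_search_prefix_next (prefix_ : String) (start : Int) (dictionary : List String) (out : Option String) : Prop := out = search_prefix_next_alt prefix_ start dictionary
instance (prefix_ : String) (start : Int) (dictionary : List String) (out : Option String) : Decidable (Spec_search_prefix_next prefix_ start dictionary out) := by unfold Spec_search_prefix_next; infer_instance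

-- ===== CLAIM (what is proved, stated in full; the proofs are below) =====
def Claim_equal_search_prefix_next : Prop := ∀ (prefix_ : String) (start : Int) (dictionary : List String), Dom_search_prefix_next prefix_ start dictionary → Spec_search_prefix_next prefix_ start dictionary (search_prefix_next prefix_ start dictionary)

-- ===== LEMMAS AND PROOFS =====

-- B's loop started at index k with fallback early: first match at index ≥ s, else early, else first match overall.
theorem pvLoopB_eq (prefix_ : String) (s : Int) :
    ∀ (l : List String) (k : Int) (early : Option String),
      pvLoopB prefix_ s k l early
        = (pvScanA prefix_ (l.drop (s - k).toNat)).or (early.or (pvScanA prefix_ l)) := by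
  intro l
  induction l with
  | nil => intro k early; simp [pvLoopB, pvScanA]
  | cons w ws ih =>
    intro k early
    by_cases hm : PySem.Chars.startswith w.toList prefix_.toList = true
    · by_cases hk : k ≥ s
      · have h0 : (s - k).toNat = 0 := by omega
        simp [pvLoopB, pvScanA, hk, h0, hm]
      · have h1 : (s - k).toNat = (s - (k + 1)).toNat + 1 := by omega
        rw [pvLoopB]
        simp only [PySem.Str.startswith_eq, hm, if_true, if_neg hk, ih, h1]
        cases early with
        | none => simp [pvScanA, hm]
        | some e => simp [pvScanA, hm]
    · have h2 : List.drop (s - k).toNat (w :: ws) =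
          if (s - k).toNat = 0 then w :: ws else List.drop ((s - k).toNat - 1) ws := by
        rcases Nat.eq_zero_or_pos (s - k).toNat with h | h
        · simp [h]
        · rw [if_neg (by omega)]
          conv_lhs => rw [show (s - k).toNat = ((s - k).toNat - 1) + 1 by omega]
          simp
      rw [pvLoopB]
      simp only [PySem.Str.startswith_eq, hm, ih, h2]
      by_cases h0 : (s - k).toNat = 0
      · have h3 : (s - (k + 1)).toNat = 0 := by omega
        simp [h0, h3, pvScanA, hm]
      · have h3 : (s - (k + 1)).toNat = (s - k).toNat - 1 := by omega
        simp [h0, h3, pvScanA, hm]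

-- B's normalization of start is exactly the slice clamp.
theorem alt_eq (prefix_ : String) (start : Int) (dictionary : List String) :
    search_prefix_next_alt prefix_ start dictionary
      = (pvScanA prefix_ (dictionary.drop (PySem.List.clampIdx dictionary.length start))).or
          (pvScanA prefix_ dictionary) := by
  unfold search_prefix_next_alt
  rw [pvLoopB_eq]
  have h : ((if (if start < 0 then start + (dictionary.length : Int) else start) < 0 then 0
      else if (if start < 0 then start + (dictionary.length : Int) else start) > (dictionary.length : Int) then (dictionary.length : Int)
      else (if start < 0 then start + (dictionary.length : Int) else start)) - 0).toNat
      = PySem.List.clampIdx dictionary.length start := by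
    simp only [PySem.List.clampIdx]
    split_ifs <;> omega
  rw [h]
  simp

theorem main_eq (prefix_ : String) (start : Int) (dictionary : List String) :
    search_prefix_next prefix_ start dictionary = search_prefix_next_alt prefix_ start dictionary := by
  rw [alt_eq]
  by_cases h : start ≠ (dictionary.length : Int) ∧ start ≠ 0
  · rw [search_prefix_next, if_pos h]
    simp only [PySem.List.slice_some_none]
    cases hscan : pvScanA prefix_ (dictionary.drop (PySem.List.clampIdx dictionary.length start)) with
    | some w => simp
    | none =>
      simp only [Option.none_or]
      rw [search_prefix_next]
      simp
  · rw [search_prefix_next, if_neg h]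
    rcases not_and_or.mp h with h1 | h1 <;> push Not at h1
    · have hc : PySem.List.clampIdx dictionary.length start = dictionary.length := by
        simp only [PySem.List.clampIdx, h1]; split_ifs <;> omega
      simp [hc, pvScanA]
    · have hc : PySem.List.clampIdx dictionary.length start = 0 := by
        simp [PySem.List.clampIdx, h1]
      simp [hc]

-- ===== VERDICT (by name: the statement is the Claim_ definition above) =====
theorem search_prefix_next_spec : Claim_equal_search_prefix_next := by
  intro prefix_ start dictionary _
  unfold Spec_search_prefix_next
  exact main_eq prefix_ start dictionary
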